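-- pv_equiv track=rewrite | github.com/delabranche/nonogram.112 | tp3.py | countFalseOcean
-- ===== SOURCE A (Python) =====
-- def countFalseOcean(markedGrid, startRow, startCol):
--     size = len(markedGrid)
--     oceanSpaces = 0
--     covered = set() # set of passed coords
--     for row1 in range(size):
--         for col1 in range(size):
--             if markedGrid[row1][col1] == False:
--                 if existsPath(markedGrid, startRow, startCol, row1, col1):
--                     oceanSpaces += 1
--                     covered.add((row1, col1))
--     return oceanSpaces, covered
--
-- def existsPath(markedGrid, startRow, startCol, row, col):
--     return existsPathHelper(markedGrid, startRow, startCol, row, col , set())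
--
-- def existsPathHelper(markedGrid, startRow, startCol, row, col , visited):
--     # base case
--     if (row, col) in visited:
--         return False
--     visited.add((row, col))
--     if (row,col) == (startRow, startCol): # they're the same so they touch
--         return True
--     # recursive case
--     else:
--         directions = [(-1,0), (0,-1), (0,1), (1,0)]
--         for dir in directions:
--             drow, dcol = dir
--             if (0 <= row + drow < len(markedGrid) and
--                 0 <= col + dcol < len(markedGrid)):
--                 if markedGrid[row+drow][col+dcol] == False: # if it is touching the next False
--                     if existsPathHelper(markedGrid, startRow, startCol, row + drow , col + dcol, visited):
--                         return True
--         visited.remove((row, col))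
--         return False
-- ===== SOURCE B (Python) =====
-- def countFalseOcean(markedGrid, startRow, startCol):
--     size = len(markedGrid)
--     comp = set()
--     if 0 <= startRow < size and 0 <= startCol < size and markedGrid[startRow][startCol] == False:
--         comp.add((startRow, startCol))
--         frontier = [(startRow, startCol)]
--         while frontier:
--             newFrontier = []
--             for (r, c) in frontier:
--                 for (dr, dc) in ((-1, 0), (0, -1), (0, 1), (1, 0)):
--                     nr, nc = r + dr, c + dc
--                     if (0 <= nr < size and 0 <= nc < size and (nr, nc) not in comp
--                             and markedGrid[nr][nc] == False):
--                         comp.add((nr, nc))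
--                         newFrontier.append((nr, nc))
--             frontier = newFrontier
--     oceanSpaces = 0
--     covered = set()
--     for r in range(size):
--         for c in range(size):
--             if (r, c) in comp:
--                 oceanSpaces += 1
--                 covered.add((r, c))
--     return oceanSpaces, covered
-- ===== Notes on version B (the rewrite author's own statement) =====
-- stated objective: faster
-- what changed: A runs a fresh backtracking DFS path search from every False cell to the start (re-exploring the grid per cell); B does one breadth-first flood fill from the start over False cells and then collects the component in a single row-major scan.
import Mathlib
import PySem

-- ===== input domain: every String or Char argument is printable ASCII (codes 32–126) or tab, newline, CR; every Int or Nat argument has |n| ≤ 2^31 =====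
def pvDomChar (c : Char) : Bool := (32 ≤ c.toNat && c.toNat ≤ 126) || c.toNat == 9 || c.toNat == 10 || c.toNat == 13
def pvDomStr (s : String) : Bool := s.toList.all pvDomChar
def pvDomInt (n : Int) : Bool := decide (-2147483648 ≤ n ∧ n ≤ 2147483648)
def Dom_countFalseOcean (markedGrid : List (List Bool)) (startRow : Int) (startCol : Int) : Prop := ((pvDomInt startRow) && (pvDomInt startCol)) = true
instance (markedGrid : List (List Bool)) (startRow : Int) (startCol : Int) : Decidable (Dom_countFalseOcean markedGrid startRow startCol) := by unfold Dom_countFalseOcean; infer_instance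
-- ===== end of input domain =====

-- B replaces A's per-cell backtracking DFS path search by a single flood fill from the start
-- plus one row-major collection pass (objective: faster, asymptotically).
-- Equivalence is about the RETURN value; neither program mutates its arguments.

-- shared grid-access helper: markedGrid[r][c], total with default `true` (only read in-range under Pre_)
def pvCell (g : List (List Bool)) (r c : Int) : Bool :=
  (PySem.List.pyGet? ((PySem.List.pyGet? g r).getD []) c).getD true

-- the finite set of in-bounds coordinates, used only in termination measures and proofs
def pvIcc (n : Nat) : Finset Int := (List.range n).toFinset.image (fun k : Nat => (k : Int))

def pvBounds (g : List (List Bool)) : Finset (Int × Int) := pvIcc g.length ×ˢ pvIcc g.length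

lemma mem_pvIcc (n : Nat) (i : Int) : i ∈ pvIcc n ↔ 0 ≤ i ∧ i < (n : Int) := by
  simp only [pvIcc, Finset.mem_image, List.mem_toFinset, List.mem_range]
  constructor
  · rintro ⟨k, hk, rfl⟩; omega
  · intro h; exact ⟨i.toNat, by omega, by omega⟩

lemma mem_pvBounds (g : List (List Bool)) (p : Int × Int) :
    p ∈ pvBounds g ↔ 0 ≤ p.1 ∧ p.1 < (g.length : Int) ∧ 0 ≤ p.2 ∧ p.2 < (g.length : Int) := by
  simp only [pvBounds, Finset.mem_product, mem_pvIcc]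
  omega

-- ===== PORT A =====

-- measure lemma cited by existsPathHelper's decreasing_by
lemma pvMeasure_lt (g : List (List Bool)) (visited : Finset (Int × Int)) (p q : Int × Int)
    (hq : q ∈ pvBounds g) (hp : p ∉ visited) :
    ((pvBounds g ∪ {q}) \ insert p visited).card < ((pvBounds g ∪ {p}) \ visited).card := by
  have h1 : pvBounds g ∪ {q} = pvBounds g := Finset.union_eq_left.mpr (by simpa using hq)
  rw [h1]
  apply Finset.card_lt_card
  constructor
  · intro x hx
    simp only [Finset.mem_sdiff, Finset.mem_insert, Finset.mem_union, Finset.mem_singleton] at hx ⊢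
    tauto
  · intro hsub
    have := hsub (by simp [Finset.mem_sdiff, hp] : p ∈ (pvBounds g ∪ {p}) \ visited)
    simp [Finset.mem_sdiff] at this

-- Python's existsPathHelper; the mutable `visited` is threaded functionally (a failing call
-- restores `visited` in the Python, so each recursive call receives visited ∪ {(row,col)});
-- the loop over the 4-element literal `directions` list is unrolled into the `||` chain.
def existsPathHelper (g : List (List Bool)) (sr sc r c : Int) (visited : Finset (Int × Int)) : Bool :=
  if hv : (r, c) ∈ visited then false
  else if (r, c) = (sr, sc) then true
  else
    (if h1 : (0 ≤ r - 1 ∧ r - 1 < (g.length : Int) ∧ 0 ≤ c ∧ c < (g.length : Int)) ∧ pvCell g (r-1) c = false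
      then existsPathHelper g sr sc (r-1) c (insert (r, c) visited) else false) ||
    (if h2 : (0 ≤ r ∧ r < (g.length : Int) ∧ 0 ≤ c - 1 ∧ c - 1 < (g.length : Int)) ∧ pvCell g r (c-1) = false
      then existsPathHelper g sr sc r (c-1) (insert (r, c) visited) else false) ||
    (if h3 : (0 ≤ r ∧ r < (g.length : Int) ∧ 0 ≤ c + 1 ∧ c + 1 < (g.length : Int)) ∧ pvCell g r (c+1) = false
      then existsPathHelper g sr sc r (c+1) (insert (r, c) visited) else false) ||
    (if h4 : (0 ≤ r + 1 ∧ r + 1 < (g.length : Int) ∧ 0 ≤ c ∧ c < (g.length : Int)) ∧ pvCell g (r+1) c = false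
      then existsPathHelper g sr sc (r+1) c (insert (r, c) visited) else false)
termination_by ((pvBounds g ∪ {(r, c)}) \ visited).card
decreasing_by
  · exact pvMeasure_lt g visited (r, c) (r-1, c) ((mem_pvBounds g _).mpr (by simp only []; omega)) hv
  · exact pvMeasure_lt g visited (r, c) (r, c-1) ((mem_pvBounds g _).mpr (by simp only []; omega)) hv
  · exact pvMeasure_lt g visited (r, c) (r, c+1) ((mem_pvBounds g _).mpr (by simp only []; omega)) hv
  · exact pvMeasure_lt g visited (r, c) (r+1, c) ((mem_pvBounds g _).mpr (by simp only []; omega)) hv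

def existsPath (g : List (List Bool)) (sr sc r c : Int) : Bool :=
  existsPathHelper g sr sc r c ∅

def countFalseOcean (markedGrid : List (List Bool)) (startRow : Int) (startCol : Int) : Int × (List (Int × Int)) :=
  let size := markedGrid.length
  (PySem.List.pyRange 0 size 1).foldl (fun st row1 =>
    (PySem.List.pyRange 0 size 1).foldl (fun st col1 =>
      if pvCell markedGrid row1 col1 = false then
        if existsPath markedGrid startRow startCol row1 col1 then
          (st.1 + 1, PySem.Set.add st.2 (row1, col1))
        else st
      else st) st)
    ((0 : Int), (PySem.Set.empty : PySem.Set (Int × Int)))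

-- ===== PORT B =====

-- one neighbour check of the flood fill: state = (component-so-far, new frontier being built)
def bfsStep (g : List (List Bool)) (p : Int × Int)
    (st : Finset (Int × Int) × List (Int × Int)) (d : Int × Int) :
    Finset (Int × Int) × List (Int × Int) :=
  let q := (p.1 + d.1, p.2 + d.2)
  if (0 ≤ q.1 ∧ q.1 < (g.length : Int) ∧ 0 ≤ q.2 ∧ q.2 < (g.length : Int)) ∧
      q ∉ st.1 ∧ pvCell g q.1 q.2 = false then
    (insert q st.1, st.2 ++ [q])
  else st

def pvDirs : List (Int × Int) := [(-1, 0), (0, -1), (0, 1), (1, 0)]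

def bfsVisit (g : List (List Bool)) (st : Finset (Int × Int) × List (Int × Int)) (p : Int × Int) :
    Finset (Int × Int) × List (Int × Int) :=
  pvDirs.foldl (bfsStep g p) st

-- one whole round of the while-loop: process every frontier cell
def bfsRound (g : List (List Bool)) (frontier : List (Int × Int)) (comp : Finset (Int × Int)) :
    Finset (Int × Int) × List (Int × Int) :=
  frontier.foldl (bfsVisit g) (comp, [])

-- round invariant, cited by bfsLoop's decreasing_by (and reused in the proofs below)
def RInv (g : List (List Bool)) (comp0 : Finset (Int × Int))
    (st : Finset (Int × Int) × List (Int × Int)) : Prop :=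
  comp0 ⊆ st.1 ∧ (∀ q ∈ st.2, q ∈ pvBounds g ∧ q ∉ comp0 ∧ q ∈ st.1) ∧
    (∀ q ∈ st.1, q ∈ comp0 ∨ q ∈ st.2)

lemma foldl_pres {α β : Type} (P : β → Prop) (f : β → α → β)
    (h : ∀ s a, P s → P (f s a)) : ∀ (l : List α) (s : β), P s → P (l.foldl f s) := by
  intro l
  induction l with
  | nil => intro s hs; exact hs
  | cons a l ih => intro s hs; exact ih _ (h s a hs)

lemma bfsStep_rinv (g : List (List Bool)) (comp0 : Finset (Int × Int)) (p : Int × Int)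
    (st : Finset (Int × Int) × List (Int × Int)) (d : Int × Int)
    (h : RInv g comp0 st) : RInv g comp0 (bfsStep g p st d) := by
  obtain ⟨h1, h2, h3⟩ := h
  unfold bfsStep
  dsimp only
  split
  · rename_i hg
    refine ⟨h1.trans (Finset.subset_insert _ _), ?_, ?_⟩
    · intro q hq
      simp only [List.mem_append, List.mem_singleton] at hq
      rcases hq with hq | hq
      · exact ⟨(h2 q hq).1, (h2 q hq).2.1, Finset.mem_insert_of_mem (h2 q hq).2.2⟩
      · subst hq
        exact ⟨(mem_pvBounds g _).mpr (by exact hg.1), fun hc => hg.2.1 (h1 hc), Finset.mem_insert_self _ _⟩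
    · intro q hq
      rcases Finset.mem_insert.mp hq with hq | hq
      · subst hq; right; simp
      · rcases h3 q hq with h | h
        · exact Or.inl h
        · right; simp [h]
  · exact ⟨h1, h2, h3⟩

lemma bfsRound_rinv (g : List (List Bool)) (frontier : List (Int × Int)) (comp : Finset (Int × Int)) :
    RInv g comp (bfsRound g frontier comp) := by
  unfold bfsRound
  apply foldl_pres (RInv g comp)
  · intro s a hs
    exact foldl_pres (RInv g comp) _ (fun s d hs => bfsStep_rinv g comp a s d hs) _ _ hs
  · exact ⟨Finset.Subset.refl _, by simp, fun q hq => Or.inl hq⟩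

def bfsLoop (g : List (List Bool)) (frontier : List (Int × Int)) (comp : Finset (Int × Int)) :
    Finset (Int × Int) :=
  if _hf : frontier = [] then comp
  else bfsLoop g (bfsRound g frontier comp).2 (bfsRound g frontier comp).1
termination_by 2 * ((pvBounds g) \ comp).card + (if frontier = [] then 0 else 1)
decreasing_by
  have hr := bfsRound_rinv g frontier comp
  obtain ⟨h1, h2, _⟩ := hr
  have hsub : pvBounds g \ (bfsRound g frontier comp).1 ⊆ pvBounds g \ comp := by
    intro x hx
    simp only [Finset.mem_sdiff] at hx ⊢
    exact ⟨hx.1, fun hc => hx.2 (h1 hc)⟩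
  rw [if_neg _hf]
  rcases hnf : (bfsRound g frontier comp).2 with _ | ⟨q, nf'⟩
  · have h0 : (if ([] : List (Int × Int)) = [] then 0 else 1) = 0 := by simp
    rw [h0]
    have := Finset.card_le_card hsub
    omega
  · have hq := h2 q (by rw [hnf]; simp)
    have hlt : (pvBounds g \ (bfsRound g frontier comp).1).card < (pvBounds g \ comp).card := by
      apply Finset.card_lt_card
      refine ⟨hsub, fun hsub2 => ?_⟩
      have := hsub2 (Finset.mem_sdiff.mpr ⟨hq.1, hq.2.1⟩)
      rw [Finset.mem_sdiff] at this
      exact this.2 hq.2.2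
    have h0 : (if (q :: nf' : List (Int × Int)) = [] then 0 else 1) = 1 := by simp
    rw [h0]
    omega

def countFalseOcean_alt (markedGrid : List (List Bool)) (startRow : Int) (startCol : Int) : Int × (List (Int × Int)) :=
  let size := markedGrid.length
  let comp : Finset (Int × Int) :=
    if (0 ≤ startRow ∧ startRow < (size : Int) ∧ 0 ≤ startCol ∧ startCol < (size : Int)) ∧
        pvCell markedGrid startRow startCol = false then
      bfsLoop markedGrid [(startRow, startCol)] {(startRow, startCol)}
    else ∅
  (PySem.List.pyRange 0 size 1).foldl (fun st r =>
    (PySem.List.pyRange 0 size 1).foldl (fun st c =>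
      if (r, c) ∈ comp then (st.1 + 1, PySem.Set.add st.2 (r, c)) else st) st)
    ((0 : Int), (PySem.Set.empty : PySem.Set (Int × Int)))

-- ===== PRECONDITION & SPEC =====
-- Pre_ excludes exactly the ragged grids on which some row is shorter than the number of rows:
-- there Python A raises IndexError while scanning the full size×size square.
def Pre_countFalseOcean (markedGrid : List (List Bool)) (startRow : Int) (startCol : Int) : Prop :=
  ∀ row ∈ markedGrid, markedGrid.length ≤ row.length
instance (markedGrid : List (List Bool)) (startRow : Int) (startCol : Int) : Decidable (Pre_countFalseOcean markedGrid startRow startCol) := by unfold Pre_countFalseOcean; infer_instance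

def pvWitness_countFalseOcean : List (List Bool) × Int × Int := ([[false, true], [false, false]], 1, 1)

def Spec_countFalseOcean (markedGrid : List (List Bool)) (startRow : Int) (startCol : Int) (out : Int × (List (Int × Int))) : Prop := out = countFalseOcean_alt markedGrid startRow startCol
instance (markedGrid : List (List Bool)) (startRow : Int) (startCol : Int) (out : Int × (List (Int × Int))) : Decidable (Spec_countFalseOcean markedGrid startRow startCol out) := by unfold Spec_countFalseOcean; infer_instance

-- ===== CLAIM (what is proved, stated in full; the proofs are below) =====
def Claim_equal_countFalseOcean : Prop := ∀ (markedGrid : List (List Bool)) (startRow : Int) (startCol : Int), Dom_countFalseOcean markedGrid startRow startCol → Pre_countFalseOcean markedGrid startRow startCol → Spec_countFalseOcean markedGrid startRow startCol (countFalseOcean markedGrid startRow startCol)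

-- ===== LEMMAS AND PROOFS =====

-- the step relation of both searches: q is a 4-neighbour of p, in bounds and False
def GoodCell (g : List (List Bool)) (p : Int × Int) : Prop :=
  (0 ≤ p.1 ∧ p.1 < (g.length : Int) ∧ 0 ≤ p.2 ∧ p.2 < (g.length : Int)) ∧ pvCell g p.1 p.2 = false

def Step (g : List (List Bool)) (p q : Int × Int) : Prop :=
  (q = (p.1 - 1, p.2) ∨ q = (p.1, p.2 - 1) ∨ q = (p.1, p.2 + 1) ∨ q = (p.1 + 1, p.2)) ∧ GoodCell g q

lemma Step_rev (g : List (List Bool)) (p q : Int × Int)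
    (h : Step g p q) (hp : GoodCell g p) : Step g q p := by
  obtain ⟨hadj, _⟩ := h
  refine ⟨?_, hp⟩
  rcases hadj with h | h | h | h <;> subst h <;> simp

lemma good_of_rtg (g : List (List Bool)) (p q : Int × Int)
    (hp : GoodCell g p) (h : Relation.ReflTransGen (Step g) p q) : GoodCell g q := by
  induction h with
  | refl => exact hp
  | tail _ hstep ih => exact hstep.2

lemma rtg_symm (g : List (List Bool)) (p q : Int × Int)
    (hp : GoodCell g p) (h : Relation.ReflTransGen (Step g) p q) :
    Relation.ReflTransGen (Step g) q p := by
  induction h with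
  | refl => exact Relation.ReflTransGen.refl
  | tail hab hstep ih =>
      exact Relation.ReflTransGen.head (Step_rev g _ _ hstep (good_of_rtg g _ _ hp hab)) ih

-- ========== characterisation of A's DFS ==========

lemma helper_sound (g : List (List Bool)) (sr sc : Int) :
    ∀ (r c : Int) (v : Finset (Int × Int)),
      existsPathHelper g sr sc r c v = true →
      Relation.ReflTransGen (Step g) (r, c) (sr, sc) := by
  intro r c v
  fun_induction existsPathHelper g sr sc r c v with
  | case1 r c v hv => intro h; simp at h
  | case2 r c v hv heq => intro _; exact heq ▸ Relation.ReflTransGen.refl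
  | case3 r c v hv hne iA iB iC iD =>
      intro h
      simp only [Bool.or_eq_true] at h
      rcases h with ((h | h) | h) | h
      · by_cases hg : (0 ≤ r - 1 ∧ r - 1 < (g.length : Int) ∧ 0 ≤ c ∧ c < (g.length : Int)) ∧ pvCell g (r-1) c = false
        · rw [dif_pos hg] at h
          exact Relation.ReflTransGen.head ⟨Or.inl rfl, hg⟩ (iA hg h)
        · rw [dif_neg hg] at h; simp at h
      · by_cases hg : (0 ≤ r ∧ r < (g.length : Int) ∧ 0 ≤ c - 1 ∧ c - 1 < (g.length : Int)) ∧ pvCell g r (c-1) = false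
        · rw [dif_pos hg] at h
          exact Relation.ReflTransGen.head ⟨Or.inr (Or.inl rfl), hg⟩ (iB hg h)
        · rw [dif_neg hg] at h; simp at h
      · by_cases hg : (0 ≤ r ∧ r < (g.length : Int) ∧ 0 ≤ c + 1 ∧ c + 1 < (g.length : Int)) ∧ pvCell g r (c+1) = false
        · rw [dif_pos hg] at h
          exact Relation.ReflTransGen.head ⟨Or.inr (Or.inr (Or.inl rfl)), hg⟩ (iC hg h)
        · rw [dif_neg hg] at h; simp at h
      · by_cases hg : (0 ≤ r + 1 ∧ r + 1 < (g.length : Int) ∧ 0 ≤ c ∧ c < (g.length : Int)) ∧ pvCell g (r+1) c = false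
        · rw [dif_pos hg] at h
          exact Relation.ReflTransGen.head ⟨Or.inr (Or.inr (Or.inr rfl)), hg⟩ (iD hg h)
        · rw [dif_neg hg] at h; simp at h

-- a path as an explicit list of cells; used for the completeness direction
def IsAvoidPath (g : List (List Bool)) (v : Finset (Int × Int)) (l : List (Int × Int))
    (p s : Int × Int) : Prop :=
  l ≠ [] ∧ l.head? = some p ∧ l.getLast? = some s ∧ List.IsChain (Step g) l ∧ ∀ x ∈ l, x ∉ v

lemma helper_complete (g : List (List Bool)) (sr sc : Int) :
    ∀ (n : Nat) (l : List (Int × Int)) (v : Finset (Int × Int)) (p : Int × Int),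
      l.length ≤ n → IsAvoidPath g v l p (sr, sc) →
      existsPathHelper g sr sc p.1 p.2 v = true := by
  intro n
  induction n with
  | zero =>
      intro l v p hlen hap
      obtain ⟨hne, -, -, -, -⟩ := hap
      cases l
      · exact absurd rfl hne
      · simp at hlen
  | succ n ih =>
      rintro l v ⟨pr, pc⟩ hlen hap
      obtain ⟨hne, hhead, hlast, hchain, havoid⟩ := hap
      obtain ⟨rest, rfl⟩ : ∃ rest, l = (pr, pc) :: rest := by
        cases l with
        | nil => exact absurd rfl hne
        | cons a t => exact ⟨t, by simp_all⟩
      have hpv : (pr, pc) ∉ v := havoid (pr, pc) (by simp)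
      by_cases hps : ((pr, pc) : Int × Int) = (sr, sc)
      · rw [existsPathHelper, dif_neg hpv, if_pos hps]
      · have hrest_ne : rest ≠ [] := by
          rintro rfl
          simp [List.getLast?] at hlast
          exact hps (by simp [hlast])
        by_cases hmem : ((pr, pc) : Int × Int) ∈ rest
        · obtain ⟨a, b, rfl⟩ := List.append_of_mem hmem
          apply ih ((pr, pc) :: b) v (pr, pc) (by simp at hlen ⊢; omega)
          refine ⟨by simp, by simp, ?_, ?_, ?_⟩
          · have : ((pr, pc) :: (a ++ (pr, pc) :: b)) = ((pr, pc) :: a) ++ (pr, pc) :: b := by simp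
            rw [this] at hlast
            rwa [List.getLast?_append_cons] at hlast
          · have : ((pr, pc) :: (a ++ (pr, pc) :: b)) = ((pr, pc) :: a) ++ (pr, pc) :: b := by simp
            rw [this] at hchain
            exact (List.isChain_split.mp hchain).2
          · intro x hx
            apply havoid
            rcases List.mem_cons.mp hx with h | h
            · simp [h]
            · simp [h]
        · obtain ⟨x1, rest', rfl⟩ : ∃ x1 rest', rest = x1 :: rest' := by
            cases rest with
            | nil => exact absurd rfl hrest_ne
            | cons a t => exact ⟨a, t, rfl⟩
          have hstep : Step g (pr, pc) x1 := (List.isChain_cons_cons.mp hchain).1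
          have hchain' : List.IsChain (Step g) (x1 :: rest') := (List.isChain_cons_cons.mp hchain).2
          have hlast' : (x1 :: rest').getLast? = some ((sr, sc) : Int × Int) := by
            rwa [List.getLast?_cons_cons] at hlast
          have hIH : existsPathHelper g sr sc x1.1 x1.2 (insert ((pr, pc) : Int × Int) v) = true := by
            apply ih (x1 :: rest') (insert (pr, pc) v) x1 (by simp at hlen ⊢; omega)
            refine ⟨by simp, by simp, hlast', hchain', ?_⟩
            intro x hx
            rw [Finset.mem_insert, not_or]
            constructor
            · rintro rfl; exact hmem hx
            · exact havoid x (List.mem_cons_of_mem _ hx)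
          obtain ⟨hadj, hgood⟩ := hstep
          obtain ⟨hgb, hgc⟩ := hgood
          rw [existsPathHelper]
          rw [dif_neg hpv, if_neg hps]
          simp only [Bool.or_eq_true]
          rcases hadj with h | h | h | h
          · subst h
            refine Or.inl (Or.inl (Or.inl ?_))
            have hg : (0 <= pr - 1 ∧ pr - 1 < (g.length : Int) ∧ 0 <= pc ∧ pc < (g.length : Int)) ∧ pvCell g (pr - 1) pc = false := ⟨hgb, hgc⟩
            rw [dif_pos hg]; exact hIH
          · subst h
            refine Or.inl (Or.inl (Or.inr ?_))
            have hg : (0 <= pr ∧ pr < (g.length : Int) ∧ 0 <= pc - 1 ∧ pc - 1 < (g.length : Int)) ∧ pvCell g pr (pc - 1) = false := ⟨hgb, hgc⟩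
            rw [dif_pos hg]; exact hIH
          · subst h
            refine Or.inl (Or.inr ?_)
            have hg : (0 <= pr ∧ pr < (g.length : Int) ∧ 0 <= pc + 1 ∧ pc + 1 < (g.length : Int)) ∧ pvCell g pr (pc + 1) = false := ⟨hgb, hgc⟩
            rw [dif_pos hg]; exact hIH
          · subst h
            refine Or.inr ?_
            have hg : (0 <= pr + 1 ∧ pr + 1 < (g.length : Int) ∧ 0 <= pc ∧ pc < (g.length : Int)) ∧ pvCell g (pr + 1) pc = false := ⟨hgb, hgc⟩
            rw [dif_pos hg]; exact hIH

lemma rtg_to_path (g : List (List Bool)) (p s : Int × Int)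
    (h : Relation.ReflTransGen (Step g) p s) :
    ∃ l, IsAvoidPath g ∅ l p s := by
  induction h with
  | refl => exact ⟨[p], by simp, by simp⟩
  | @tail b c hab hstep ih =>
      obtain ⟨l, hne, hhead, hlast, hchain, -⟩ := ih
      refine ⟨l ++ [c], by simp, ?_, by simp, ?_, by simp⟩
      · obtain ⟨x, t, rfl⟩ : ∃ x t, l = x :: t := by
          cases l with
          | nil => exact absurd rfl hne
          | cons x t => exact ⟨x, t, rfl⟩
        simpa using hhead
      · obtain ⟨l', rfl⟩ := List.getLast?_eq_some_iff.mp hlast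
        have heq : (l' ++ [b]) ++ [c] = l' ++ b :: [c] := by simp
        rw [heq]
        exact List.isChain_split.mpr ⟨hchain, List.isChain_pair.mpr hstep⟩

lemma existsPath_iff (g : List (List Bool)) (sr sc r c : Int) :
    existsPath g sr sc r c = true ↔ Relation.ReflTransGen (Step g) (r, c) (sr, sc) := by
  constructor
  · exact helper_sound g sr sc r c ∅
  · intro h
    obtain ⟨l, hl⟩ := rtg_to_path g (r, c) (sr, sc) h
    exact helper_complete g sr sc l.length l ∅ (r, c) le_rfl hl

-- ========== characterisation of B's flood fill ==========

lemma foldl_estab {α β : Type} (P : β → Prop) (f : β → α → β)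
    (hmono : ∀ s a, P s → P (f s a)) (a : α) (hest : ∀ s, P (f s a)) :
    ∀ (l : List α) (s : β), a ∈ l → P (l.foldl f s) := by
  intro l
  induction l with
  | nil => intro s h; simp at h
  | cons b l ih =>
      intro s h
      rcases List.mem_cons.mp h with h | h
      · subst h
        by_cases hl : a ∈ l
        · exact ih _ hl
        · exact foldl_pres P f hmono l (f s a) (hest s)
      · exact ih _ h

lemma bfsStep_mono (g : List (List Bool)) (p : Int × Int)
    (st : Finset (Int × Int) × List (Int × Int)) (d : Int × Int) :
    st.1 ⊆ (bfsStep g p st d).1 := by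
  unfold bfsStep
  dsimp only
  split
  · exact Finset.subset_insert _ _
  · exact Finset.Subset.refl _

lemma bfsVisit_mono (g : List (List Bool)) (st : Finset (Int × Int) × List (Int × Int))
    (p : Int × Int) : st.1 ⊆ (bfsVisit g st p).1 := by
  unfold bfsVisit
  exact foldl_pres (fun t => st.1 ⊆ t.1) (bfsStep g p)
    (fun s d hs => hs.trans (bfsStep_mono g p s d)) pvDirs st (Finset.Subset.refl _)

lemma foldl_pres_mem {α β : Type} (P : β → Prop) (f : β → α → β) :
    ∀ (l : List α), (∀ s a, a ∈ l → P s → P (f s a)) → ∀ s, P s → P (l.foldl f s) := by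
  intro l
  induction l with
  | nil => intro _ s hs; exact hs
  | cons a l ih =>
      intro h s hs
      exact ih (fun s b hb => h s b (List.mem_cons_of_mem _ hb)) _ (h s a (by simp) hs)

lemma bfsRound_sound (g : List (List Bool)) (frontier : List (Int × Int)) (comp : Finset (Int × Int)) :
    ∀ q ∈ (bfsRound g frontier comp).1, q ∈ comp ∨ ∃ p ∈ frontier, Step g p q := by
  unfold bfsRound
  refine foldl_pres_mem (fun st => ∀ q ∈ st.1, q ∈ comp ∨ ∃ p ∈ frontier, Step g p q)
    (bfsVisit g) frontier ?_ (comp, []) (fun q hq => Or.inl hq)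
  intro st p hp hst
  unfold bfsVisit
  refine foldl_pres_mem (fun st => ∀ q ∈ st.1, q ∈ comp ∨ ∃ p ∈ frontier, Step g p q)
    (bfsStep g p) pvDirs ?_ st hst
  intro st2 d hd hst2
  unfold bfsStep
  dsimp only
  split
  · rename_i hg
    intro q hq
    rcases Finset.mem_insert.mp hq with rfl | hq
    · right
      refine ⟨p, hp, ?_, ⟨hg.1, hg.2.2⟩⟩
      simp only [pvDirs, List.mem_cons] at hd
      rcases hd with rfl | rfl | rfl | rfl | h
      · exact Or.inl (by simp only [Prod.mk.injEq]; constructor <;> omega)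
      · exact Or.inr (Or.inl (by simp only [Prod.mk.injEq]; constructor <;> omega))
      · exact Or.inr (Or.inr (Or.inl (by simp only [Prod.mk.injEq]; constructor <;> first | trivial | omega)))
      · exact Or.inr (Or.inr (Or.inr (by simp only [Prod.mk.injEq]; constructor <;> first | trivial | omega)))
      · simp at h
    · exact hst2 q hq
  · exact hst2

lemma bfsRound_closed (g : List (List Bool)) (frontier : List (Int × Int)) (comp : Finset (Int × Int))
    (p : Int × Int) (hp : p ∈ frontier) (q : Int × Int) (hq : Step g p q) :
    q ∈ (bfsRound g frontier comp).1 := by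
  obtain ⟨hadj, hgood⟩ := hq
  unfold bfsRound
  apply foldl_estab (fun st => q ∈ st.1) (bfsVisit g)
    (fun s p' hs => bfsVisit_mono g s p' hs) p ?est frontier (comp, []) hp
  case est =>
    intro st
    unfold bfsVisit
    have key : ∀ (d : Int × Int), d ∈ pvDirs → (p.1 + d.1, p.2 + d.2) = q →
        ∀ st2 : Finset (Int × Int) × List (Int × Int), q ∈ (bfsStep g p st2 d).1 := by
      intro d _ hdq st2
      by_cases hm : q ∈ st2.1
      · exact bfsStep_mono g p st2 d hm
      · have h1 : p.1 + d.1 = q.1 := by rw [← hdq]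
        have h2 : p.2 + d.2 = q.2 := by rw [← hdq]
        have hA : (0 ≤ p.1 + d.1 ∧ p.1 + d.1 < (g.length : Int) ∧
            0 ≤ p.2 + d.2 ∧ p.2 + d.2 < (g.length : Int)) := by
          rw [h1, h2]; exact hgood.1
        have hC : pvCell g (p.1 + d.1) (p.2 + d.2) = false := by
          rw [h1, h2]; exact hgood.2
        have hB : ((p.1 + d.1, p.2 + d.2) : Int × Int) ∉ st2.1 := by rw [hdq]; exact hm
        unfold bfsStep
        dsimp only
        rw [if_pos ⟨hA, hB, hC⟩]
        rw [hdq]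
        exact Finset.mem_insert_self _ _
    rcases hadj with h | h | h | h
    · exact foldl_estab (fun t => q ∈ t.1) (bfsStep g p)
        (fun s d hs => bfsStep_mono g p s d hs) (-1, 0)
        (key (-1, 0) (by simp [pvDirs]) (by rw [h]; simp only [Prod.mk.injEq]; constructor <;> omega))
        pvDirs st (by simp [pvDirs])
    · exact foldl_estab (fun t => q ∈ t.1) (bfsStep g p)
        (fun s d hs => bfsStep_mono g p s d hs) (0, -1)
        (key (0, -1) (by simp [pvDirs]) (by rw [h]; simp only [Prod.mk.injEq]; constructor <;> omega))
        pvDirs st (by simp [pvDirs])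
    · exact foldl_estab (fun t => q ∈ t.1) (bfsStep g p)
        (fun s d hs => bfsStep_mono g p s d hs) (0, 1)
        (key (0, 1) (by simp [pvDirs]) (by rw [h]; simp only [Prod.mk.injEq]; constructor <;> first | trivial | omega))
        pvDirs st (by simp [pvDirs])
    · exact foldl_estab (fun t => q ∈ t.1) (bfsStep g p)
        (fun s d hs => bfsStep_mono g p s d hs) (1, 0)
        (key (1, 0) (by simp [pvDirs]) (by rw [h]; simp only [Prod.mk.injEq]; constructor <;> first | trivial | omega))
        pvDirs st (by simp [pvDirs])

lemma bfsLoop_sound (g : List (List Bool)) (s : Int × Int) :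
    ∀ (frontier : List (Int × Int)) (comp : Finset (Int × Int)),
      (∀ p ∈ comp, Relation.ReflTransGen (Step g) s p) → (∀ p ∈ frontier, p ∈ comp) →
      ∀ p ∈ bfsLoop g frontier comp, Relation.ReflTransGen (Step g) s p := by
  intro frontier comp
  induction frontier, comp using bfsLoop.induct g with
  | case1 comp =>
      intro h1 _ p hp
      rw [bfsLoop, dif_pos rfl] at hp
      exact h1 p hp
  | case2 frontier comp hf ih =>
      intro h1 h2 p hp
      rw [bfsLoop, dif_neg hf] at hp
      refine ih ?_ ?_ p hp
      · intro q hq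
        rcases bfsRound_sound g frontier comp q hq with h | ⟨p', hp', hs⟩
        · exact h1 q h
        · exact (h1 p' (h2 p' hp')).tail hs
      · intro q hq
        exact ((bfsRound_rinv g frontier comp).2.1 q hq).2.2

lemma bfsLoop_complete (g : List (List Bool)) :
    ∀ (frontier : List (Int × Int)) (comp : Finset (Int × Int)),
      (∀ p ∈ comp, p ∉ frontier → ∀ q, Step g p q → q ∈ comp) →
      comp ⊆ bfsLoop g frontier comp ∧
        (∀ p ∈ bfsLoop g frontier comp, ∀ q, Step g p q → q ∈ bfsLoop g frontier comp) := by
  intro frontier comp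
  induction frontier, comp using bfsLoop.induct g with
  | case1 comp =>
      intro hcl
      rw [bfsLoop, dif_pos rfl]
      exact ⟨Finset.Subset.refl _, fun p hp q hq => hcl p hp (by simp) q hq⟩
  | case2 frontier comp hf ih =>
      intro hcl
      rw [bfsLoop, dif_neg hf]
      have hr := bfsRound_rinv g frontier comp
      have hnew : ∀ p ∈ (bfsRound g frontier comp).1, p ∉ (bfsRound g frontier comp).2 →
          ∀ q, Step g p q → q ∈ (bfsRound g frontier comp).1 := by
        intro p hp hpn q hq
        by_cases hpc : p ∈ comp
        · by_cases hpf : p ∈ frontier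
          · exact bfsRound_closed g frontier comp p hpf q hq
          · exact hr.1 (hcl p hpc hpf q hq)
        · rcases hr.2.2 p hp with h | h
          · exact absurd h hpc
          · exact absurd h hpn
      obtain ⟨hsub, hclosed⟩ := ih hnew
      exact ⟨fun x hx => hsub (hr.1 hx), hclosed⟩

-- ========== the two membership conditions agree ==========

lemma main_iff (g : List (List Bool)) (sr sc r c : Int)
    (hin : 0 ≤ r ∧ r < (g.length : Int) ∧ 0 ≤ c ∧ c < (g.length : Int)) :
    ((pvCell g r c = false ∧ existsPath g sr sc r c = true) ↔
      (r, c) ∈ (if (0 ≤ sr ∧ sr < ((g.length : Nat) : Int) ∧ 0 ≤ sc ∧ sc < ((g.length : Nat) : Int)) ∧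
          pvCell g sr sc = false then
        bfsLoop g [(sr, sc)] {(sr, sc)} else ∅)) := by
  split
  · rename_i hstart
    have hgoods : GoodCell g (sr, sc) := ⟨hstart.1, hstart.2⟩
    constructor
    · rintro ⟨hcell, hpath⟩
      have hgoodp : GoodCell g (r, c) := ⟨hin, hcell⟩
      have hrtg := rtg_symm g _ _ hgoodp ((existsPath_iff g sr sc r c).mp hpath)
      obtain ⟨hsub, hclosed⟩ := bfsLoop_complete g [(sr, sc)] {(sr, sc)}
        (by intro p hp hpn; exact absurd (by simpa using Finset.mem_singleton.mp hp) hpn)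
      have hs_in : ((sr, sc) : Int × Int) ∈ bfsLoop g [(sr, sc)] {(sr, sc)} :=
        hsub (Finset.mem_singleton_self _)
      have hall : ∀ x : Int × Int, Relation.ReflTransGen (Step g) (sr, sc) x →
          x ∈ bfsLoop g [(sr, sc)] {(sr, sc)} := by
        intro x hx
        induction hx with
        | refl => exact hs_in
        | tail hab hstep ihh => exact hclosed _ ihh _ hstep
      exact hall (r, c) hrtg
    · intro hmem
      have hrtg : Relation.ReflTransGen (Step g) (sr, sc) (r, c) := by
        refine bfsLoop_sound g (sr, sc) [(sr, sc)] {(sr, sc)} ?_ ?_ (r, c) hmem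
        · intro p hp
          rw [Finset.mem_singleton] at hp
          subst hp
          exact Relation.ReflTransGen.refl
        · intro p hp
          simp only [List.mem_singleton] at hp
          simp [hp]
      have hgood : GoodCell g (r, c) := good_of_rtg g _ _ hgoods hrtg
      exact ⟨hgood.2, (existsPath_iff g sr sc r c).mpr (rtg_symm g _ _ hgoods hrtg)⟩
  · rename_i hstart
    simp only [Finset.notMem_empty, iff_false]
    rintro ⟨hcell, hpath⟩
    have hgoodp : GoodCell g (r, c) := ⟨hin, hcell⟩
    exact hstart (good_of_rtg g _ _ hgoodp ((existsPath_iff g sr sc r c).mp hpath))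

theorem countFalseOcean_eq (g : List (List Bool)) (sr sc : Int) :
    countFalseOcean g sr sc = countFalseOcean_alt g sr sc := by
  unfold countFalseOcean countFalseOcean_alt
  dsimp only
  apply PySem.List.foldl_congr_mem
  intro st r hr
  apply PySem.List.foldl_congr_mem
  intro st2 c hc
  rw [PySem.List.mem_pyRange_one] at hr hc
  have hin : 0 ≤ r ∧ r < (g.length : Int) ∧ 0 ≤ c ∧ c < (g.length : Int) := by
    exact ⟨hr.1, hr.2, hc.1, hc.2⟩
  by_cases hm : ((r, c) : Int × Int) ∈ (if (0 ≤ sr ∧ sr < ((g.length : Nat) : Int) ∧ 0 ≤ sc ∧ sc < ((g.length : Nat) : Int)) ∧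
      pvCell g sr sc = false then bfsLoop g [(sr, sc)] {(sr, sc)} else ∅)
  · obtain ⟨hcell, hpath⟩ := (main_iff g sr sc r c hin).mpr hm
    rw [if_pos hcell, if_pos hpath, if_pos hm]
  · rw [if_neg hm]
    split_ifs with h1 h2
    · exact absurd (main_iff g sr sc r c hin |>.mp ⟨h1, h2⟩) hm
    · rfl
    · rfl

-- ===== VERDICT (by name: the statement is the Claim_ definition above) =====
theorem countFalseOcean_spec : Claim_equal_countFalseOcean := by
  intro g sr sc _ _
  unfold Spec_countFalseOcean
  exact countFalseOcean_eq g sr sc
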